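-- pv_equiv track=rewrite | github.com/gain-zy/NERHRT | src/utils.py | Q_set
-- ===== SOURCE A (Python) =====
-- def Q_set(max_len, id_num_list, quantity_cell_list, htop=1):
--     temp = -1
--     group_dict = {}
--     for i in id_num_list:
--         temp_list = []
--         for j in quantity_cell_list:
--             if i < max_len and j < max_len and j not in id_num_list and temp != j and abs(i-j) < 4:
--                 temp_list.append(j)
--             temp = j
--         group_dict[i] = temp_list
--     return group_dict
-- ===== SOURCE B (Python) =====
-- def Q_set(max_len, id_num_list, quantity_cell_list, htop=1):
--     # Build the admissible quantity cells once (value bound, not an id, not a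
--     # consecutive duplicate), then filter per id by the |i-j| < 4 window.
--     idset = set(id_num_list)
--     cand = []
--     prev = None
--     for j in quantity_cell_list:
--         if j < max_len and j not in idset and j != prev:
--             cand.append(j)
--         prev = j
--     return {i: [j for j in cand if abs(i - j) < 4] if i < max_len else []
--             for i in id_num_list}
-- ===== Notes on version B (the rewrite author's own statement) =====
-- stated objective: faster
-- what changed: B builds the admissible quantity cells once (set membership instead of a linear 'j not in id_num_list' scan, consecutive-duplicate removal in a single pass) and then only filters that list per id by the |i-j|<4 window.
-- intended difference: When the first quantity cell passes the value/id filters but happens to equal the leftover 'temp' sentinel A carries into the id's round (-1 before the first id, the previous round's last cell afterwards) and some affected id has it in its |i-j|<4 window, A silently drops that first cell from the group; B keeps it, which is the intended grouping since the cell is not a consecutive duplicate of anything. — e.g. on Q_set(10, [0], [-1, 2], 1): A returns [(0, [2])], B returns [(0, [-1, 2])]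
import Mathlib
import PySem

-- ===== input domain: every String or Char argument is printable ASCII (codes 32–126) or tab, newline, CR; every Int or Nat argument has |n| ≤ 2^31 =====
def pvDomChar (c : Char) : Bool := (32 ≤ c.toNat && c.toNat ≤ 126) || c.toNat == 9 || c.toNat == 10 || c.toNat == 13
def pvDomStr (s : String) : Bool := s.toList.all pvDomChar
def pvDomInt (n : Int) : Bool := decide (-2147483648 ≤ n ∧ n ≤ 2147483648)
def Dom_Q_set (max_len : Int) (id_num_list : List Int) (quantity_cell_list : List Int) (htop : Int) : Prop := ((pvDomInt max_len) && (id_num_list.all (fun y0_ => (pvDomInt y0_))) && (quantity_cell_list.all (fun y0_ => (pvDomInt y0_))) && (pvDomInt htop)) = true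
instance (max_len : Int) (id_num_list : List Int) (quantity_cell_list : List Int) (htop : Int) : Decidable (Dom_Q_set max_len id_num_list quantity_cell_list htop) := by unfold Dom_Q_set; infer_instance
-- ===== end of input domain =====

-- B builds the admissible quantity cells once (set membership, one dedup pass) and filters
-- that list per id by the |i-j|<4 window (objective: faster); outside D_ it equals A.

-- ===== PORT A =====
-- body of A's inner 'for j in quantity_cell_list' loop; state = (temp, temp_list)
def pvInnerA (max_len i : Int) (id_num_list : List Int) (p : Int × List Int) (j : Int) : Int × List Int :=
  (j, if i < max_len ∧ j < max_len ∧ j ∉ id_num_list ∧ p.1 ≠ j ∧ |i - j| < 4 then p.2 ++ [j] else p.2)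

def Q_set (max_len : Int) (id_num_list : List Int) (quantity_cell_list : List Int) (htop : Int) : List (Int × List Int) :=
  ((id_num_list.foldl
      (fun (st : Int × PySem.Dict Int (List Int)) i =>
        ((quantity_cell_list.foldl (pvInnerA max_len i id_num_list) (st.1, ([] : List Int))).1,
         st.2.insert i (quantity_cell_list.foldl (pvInnerA max_len i id_num_list) (st.1, ([] : List Int))).2))
      ((-1 : Int), (PySem.Dict.empty : PySem.Dict Int (List Int)))).2).items

-- ===== PORT B =====
-- body of B's candidate loop; state = (prev, cand); prev starts as None
def pvStepB (max_len : Int) (idset : PySem.Set Int) (p : Option Int × List Int) (j : Int) : Option Int × List Int :=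
  (some j, if j < max_len ∧ j ∉ idset ∧ some j ≠ p.1 then p.2 ++ [j] else p.2)

def Q_set_alt (max_len : Int) (id_num_list : List Int) (quantity_cell_list : List Int) (htop : Int) : List (Int × List Int) :=
  let idset := PySem.Set.ofList id_num_list
  let cand := (quantity_cell_list.foldl (pvStepB max_len idset) ((none : Option Int), ([] : List Int))).2
  ((id_num_list.foldl
      (fun (d : PySem.Dict Int (List Int)) i =>
        d.insert i (if i < max_len then cand.filter (fun j => decide (|i - j| < 4)) else []))
      (PySem.Dict.empty : PySem.Dict Int (List Int))).items)

-- ===== PRECONDITION & SPEC =====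
-- When the first quantity cell passes the value/id filters but equals the stale 'temp' A
-- carries into the round (-1 before the first id, the previous round's last cell after) and
-- an affected id has it in its |i-j|<4 window, A silently drops that cell from the group;
-- B keeps it, the intended grouping since the cell is not a consecutive duplicate.
def D_Q_set (max_len : Int) (id_num_list : List Int) (quantity_cell_list : List Int) (htop : Int) : Prop :=
  quantity_cell_list ≠ [] ∧
  quantity_cell_list.headI < max_len ∧
  quantity_cell_list.headI ∉ id_num_list ∧
  ((quantity_cell_list.headI = quantity_cell_list.getLastD 0 ∧
      ∃ i ∈ id_num_list.tail, i < max_len ∧ |i - quantity_cell_list.headI| < 4)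
   ∨ (quantity_cell_list.headI = -1 ∧ id_num_list ≠ [] ∧
      id_num_list.headI ∉ id_num_list.tail ∧
      id_num_list.headI < max_len ∧ |id_num_list.headI - quantity_cell_list.headI| < 4))
instance (max_len : Int) (id_num_list : List Int) (quantity_cell_list : List Int) (htop : Int) : Decidable (D_Q_set max_len id_num_list quantity_cell_list htop) := by unfold D_Q_set; infer_instance

def Spec_Q_set (max_len : Int) (id_num_list : List Int) (quantity_cell_list : List Int) (htop : Int) (out : List (Int × List Int)) : Prop := ¬ D_Q_set max_len id_num_list quantity_cell_list htop → out = Q_set_alt max_len id_num_list quantity_cell_list htop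
instance (max_len : Int) (id_num_list : List Int) (quantity_cell_list : List Int) (htop : Int) (out : List (Int × List Int)) : Decidable (Spec_Q_set max_len id_num_list quantity_cell_list htop out) := by unfold Spec_Q_set; infer_instance

def pvDiffWitness_Q_set : Int × List Int × List Int × Int := (10, [0], [-1, 2], 1)
def pvDiffWitnessOut_Q_set : (List (Int × List Int)) × (List (Int × List Int)) :=
  ([(0, [2])], [(0, [-1, 2])])

-- ===== CLAIM (what is proved, stated in full; the proofs are below) =====
def Claim_unchanged_Q_set : Prop := ∀ (max_len : Int) (id_num_list : List Int) (quantity_cell_list : List Int) (htop : Int), Dom_Q_set max_len id_num_list quantity_cell_list htop → Spec_Q_set max_len id_num_list quantity_cell_list htop (Q_set max_len id_num_list quantity_cell_list htop)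
def Claim_exact_Q_set : Prop := ∀ (max_len : Int) (id_num_list : List Int) (quantity_cell_list : List Int) (htop : Int), Dom_Q_set max_len id_num_list quantity_cell_list htop → D_Q_set max_len id_num_list quantity_cell_list htop → Q_set max_len id_num_list quantity_cell_list htop ≠ Q_set_alt max_len id_num_list quantity_cell_list htop
def Claim_changed_Q_set : Prop := Dom_Q_set (pvDiffWitness_Q_set.1) (pvDiffWitness_Q_set.2.1) (pvDiffWitness_Q_set.2.2.1) (pvDiffWitness_Q_set.2.2.2) ∧ D_Q_set (pvDiffWitness_Q_set.1) (pvDiffWitness_Q_set.2.1) (pvDiffWitness_Q_set.2.2.1) (pvDiffWitness_Q_set.2.2.2) ∧ Q_set (pvDiffWitness_Q_set.1) (pvDiffWitness_Q_set.2.1) (pvDiffWitness_Q_set.2.2.1) (pvDiffWitness_Q_set.2.2.2) = pvDiffWitnessOut_Q_set.1 ∧ Q_set_alt (pvDiffWitness_Q_set.1) (pvDiffWitness_Q_set.2.1) (pvDiffWitness_Q_set.2.2.1) (pvDiffWitness_Q_set.2.2.2) = pvDiffWitnessOut_Q_set.2 ∧ pvDiffWitnessOut_Q_set.1 ≠ 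pvDiffWitnessOut_Q_set.2

-- ===== LEMMAS AND PROOFS =====

-- A's admissible-cells list for one round entered with sentinel 'prev' (proof device)
def pvCspec (max_len : Int) (ids : List Int) : Int → List Int → List Int
  | _, [] => []
  | prev, j :: rest =>
      (if j < max_len ∧ j ∉ ids ∧ j ≠ prev then [j] else []) ++ pvCspec max_len ids j rest

-- B's candidate list (no sentinel on the first cell)
def pvCand (max_len : Int) (ids : List Int) : List Int → List Int
  | [] => []
  | j :: rest => (if j < max_len ∧ j ∉ ids then [j] else []) ++ pvCspec max_len ids j rest

-- per-id values of the two programs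
def pvValA (max_len : Int) (ids qs : List Int) (p i : Int) : List Int :=
  if i < max_len then (pvCspec max_len ids p qs).filter (fun j => decide (|i - j| < 4)) else []
def pvValB (max_len : Int) (ids qs : List Int) (i : Int) : List Int :=
  if i < max_len then (pvCand max_len ids qs).filter (fun j => decide (|i - j| < 4)) else []

theorem pvFoldA_eq (max_len i : Int) (ids : List Int) :
    ∀ (qs : List Int) (prev : Int) (acc : List Int),
      qs.foldl (pvInnerA max_len i ids) (prev, acc)
        = (qs.getLastD prev,
           acc ++ if i < max_len
                  then (pvCspec max_len ids prev qs).filter (fun j => decide (|i - j| < 4))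
                  else []) := by
  intro qs
  induction qs with
  | nil => intro prev acc; simp [pvCspec]
  | cons j rest ih =>
      intro prev acc
      simp only [List.foldl_cons, pvInnerA, List.getLastD_cons, pvCspec]
      rw [ih]
      congr 1
      by_cases hi : i < max_len
      · have hiff : (i < max_len ∧ j < max_len ∧ j ∉ ids ∧ prev ≠ j ∧ |i - j| < 4)
            ↔ ((j < max_len ∧ j ∉ ids ∧ j ≠ prev) ∧ |i - j| < 4) := by
          constructor
          · rintro ⟨_, h2, h3, h4, h5⟩; exact ⟨⟨h2, h3, Ne.symm h4⟩, h5⟩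
          · rintro ⟨⟨h2, h3, h4⟩, h5⟩; exact ⟨hi, h2, h3, Ne.symm h4, h5⟩
        simp only [if_pos hi, List.filter_append]
        rw [if_congr hiff rfl rfl]
        by_cases hb : (j < max_len ∧ j ∉ ids ∧ ¬ j = prev)
        · by_cases ha : |i - j| < 4 <;> simp [hb, ha, List.filter]
        · simp [hb]
      · have : ¬ (i < max_len ∧ j < max_len ∧ j ∉ ids ∧ prev ≠ j ∧ |i - j| < 4) := by
          intro h; exact hi h.1
        simp [hi]

theorem pvFoldB_some (max_len : Int) (ids : List Int) :
    ∀ (qs : List Int) (prev : Int) (acc : List Int),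
      qs.foldl (pvStepB max_len (PySem.Set.ofList ids)) (some prev, acc)
        = (some (qs.getLastD prev), acc ++ pvCspec max_len ids prev qs) := by
  intro qs
  induction qs with
  | nil => intro prev acc; simp [pvCspec]
  | cons j rest ih =>
      intro prev acc
      simp only [List.foldl_cons, pvStepB, pvCspec]
      rw [ih]
      have hmem : j ∉ PySem.Set.ofList ids ↔ j ∉ ids := by
        simp [PySem.Set.mem_ofList]
      simp only [List.getLastD_cons, Prod.mk.injEq, true_and]
      split_ifs with h1 h2 h2 <;> simp_all [Option.some_inj]

theorem pvCand_eq (max_len : Int) (ids qs : List Int) :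
    (qs.foldl (pvStepB max_len (PySem.Set.ofList ids)) ((none : Option Int), ([] : List Int))).2
      = pvCand max_len ids qs := by
  cases qs with
  | nil => simp [pvCand]
  | cons j rest =>
      simp only [List.foldl_cons, pvStepB, pvCand]
      have hmem : j ∉ PySem.Set.ofList ids ↔ j ∉ ids := by
        simp [PySem.Set.mem_ofList]
      rw [pvFoldB_some]
      split_ifs with h1 h2 h2 <;> simp_all

theorem pvGetLastD_idem (qs : List Int) (d : Int) :
    qs.getLastD (qs.getLastD d) = qs.getLastD d := by
  cases h : qs.getLast? <;> simp [List.getLastD_eq_getLast?, h]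

-- after the first id, A's sentinel is pinned at the last quantity cell
theorem pvOuterA (max_len : Int) (ids qs : List Int) :
    ∀ (l : List Int) (d : PySem.Dict Int (List Int)),
      (l.foldl
        (fun (st : Int × PySem.Dict Int (List Int)) i =>
          ((qs.foldl (pvInnerA max_len i ids) (st.1, ([] : List Int))).1,
           st.2.insert i (qs.foldl (pvInnerA max_len i ids) (st.1, ([] : List Int))).2))
        (qs.getLastD (-1), d)).2
      = l.foldl (fun d i => d.insert i (pvValA max_len ids qs (qs.getLastD (-1)) i)) d := by
  intro l
  induction l with
  | nil => intro d; simp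
  | cons i rest ih =>
      intro d
      simp only [List.foldl_cons]
      rw [pvFoldA_eq, pvGetLastD_idem]
      simp only [List.nil_append]
      exact ih _

-- value at key k is irrelevant after overwriting with w
def pvOw (k : Int) (w : List Int) (p : Int × List Int) : Int × List Int :=
  if p.1 = k then (k, w) else p

theorem pvOw_fst (k : Int) (w : List Int) (p : Int × List Int) : (pvOw k w p).1 = p.1 := by
  unfold pvOw; split_ifs with h <;> simp [h]

theorem pvKeys_of_R (k : Int) (d1 d2 : PySem.Dict Int (List Int))
    (h : d1.items.map (pvOw k []) = d2.items.map (pvOw k [])) : d1.keys = d2.keys := by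
  have e1 : ∀ (d : PySem.Dict Int (List Int)), d.keys = (d.items.map (pvOw k [])).map Prod.fst := by
    intro d
    simp only [PySem.Dict.keys, List.map_map]
    exact (List.map_congr_left (fun p _ => (pvOw_fst k [] p).symm))
  rw [e1, e1, h]

theorem pvContains_of_R (k j : Int) (d1 d2 : PySem.Dict Int (List Int))
    (h : d1.items.map (pvOw k []) = d2.items.map (pvOw k [])) :
    d1.contains j = d2.contains j := by
  rw [PySem.Dict.contains_eq_decide_mem_keys, PySem.Dict.contains_eq_decide_mem_keys,
    pvKeys_of_R k d1 d2 h]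

theorem pvR_insert (k j : Int) (w : List Int) (d1 d2 : PySem.Dict Int (List Int))
    (h : d1.items.map (pvOw k []) = d2.items.map (pvOw k [])) :
    (d1.insert j w).items.map (pvOw k []) = (d2.insert j w).items.map (pvOw k []) := by
  rw [PySem.Dict.items_insert, PySem.Dict.items_insert, pvContains_of_R k j d1 d2 h]
  by_cases hc : d2.contains j = true
  · simp only [if_pos hc, List.map_map]
    by_cases hjk : j = k
    · subst hjk
      have he : ∀ p : Int × List Int,
          (pvOw j [] ∘ fun p => if (p.1 == j) = true then (j, w) else p) p = pvOw j [] p := by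
        intro p; by_cases hp : p.1 = j <;> simp [pvOw, hp]
      rw [List.map_congr_left (fun p _ => he p), List.map_congr_left (fun p _ => he p), h]
    · have he : ∀ p : Int × List Int,
          (pvOw k [] ∘ fun p => if (p.1 == j) = true then (j, w) else p) p
            = ((fun p => if (p.1 == j) = true then (j, w) else p) ∘ pvOw k []) p := by
        intro p
        by_cases hp : p.1 = j
        · have : ¬ p.1 = k := by rw [hp]; exact hjk
          simp [pvOw, hp, this, Ne.symm hjk, hjk]
        · by_cases hpk : p.1 = k <;> simp [pvOw, hp, hpk, Ne.symm hjk, hjk]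
      rw [List.map_congr_left (fun p _ => he p), List.map_congr_left (fun p _ => he p)]
      show d1.items.map ((fun p => if (p.1 == j) = true then (j, w) else p) ∘ pvOw k []) = _
      rw [← List.map_map, ← List.map_map, h]
  · simp only [if_neg hc, List.map_append, h]

theorem pvR_insert_k (k : Int) (w : List Int) (d1 d2 : PySem.Dict Int (List Int))
    (h : d1.items.map (pvOw k []) = d2.items.map (pvOw k [])) :
    (d1.insert k w).items = (d2.insert k w).items := by
  rw [PySem.Dict.items_insert, PySem.Dict.items_insert, pvContains_of_R k k d1 d2 h]
  by_cases hc : d2.contains k = true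
  · simp only [if_pos hc]
    have he : ∀ p : Int × List Int,
        (fun p : Int × List Int => if (p.1 == k) = true then (k, w) else p) p
          = ((fun p : Int × List Int => if (p.1 == k) = true then (k, w) else p) ∘ pvOw k []) p := by
      intro p; by_cases hp : p.1 = k <;> simp [pvOw, hp]
    rw [List.map_congr_left (fun p _ => he p), List.map_congr_left (fun p _ => he p)]
    show d1.items.map ((fun p : Int × List Int => if (p.1 == k) = true then (k, w) else p) ∘ pvOw k []) = _
    rw [← List.map_map, ← List.map_map, h]
  · simp only [if_neg hc]
    have hid : ∀ (d : PySem.Dict Int (List Int)), d.contains k ≠ true →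
        d.items.map (pvOw k []) = d.items := by
      intro d hd
      have hk : k ∉ d.keys := by
        rw [PySem.Dict.contains_eq_decide_mem_keys] at hd
        simpa using hd
      have hpt : ∀ p ∈ d.items, pvOw k [] p = id p := by
        intro p hp
        have : p.1 ≠ k := by
          intro hpk
          exact hk (by simpa [PySem.Dict.keys, ← hpk] using List.mem_map_of_mem (f := Prod.fst) hp)
        simp [pvOw, this]
      rw [List.map_congr_left hpt, List.map_id]
    have hc1 : d1.contains k ≠ true := by rw [pvContains_of_R k k d1 d2 h]; exact hc
    rw [hid d1 hc1, hid d2 hc] at h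
    rw [h]

theorem pvOVR (v : Int → List Int) (k : Int) :
    ∀ (l : List Int) (d1 d2 : PySem.Dict Int (List Int)),
      d1.items.map (pvOw k []) = d2.items.map (pvOw k []) → k ∈ l →
      (l.foldl (fun d i => d.insert i (v i)) d1).items
        = (l.foldl (fun d i => d.insert i (v i)) d2).items := by
  intro l
  induction l with
  | nil => intro _ _ _ hk; exact absurd hk (by simp)
  | cons j rest ih =>
      intro d1 d2 hR hk
      simp only [List.foldl_cons]
      by_cases hjk : j = k
      · subst hjk
        have : d1.insert j (v j) = d2.insert j (v j) :=
          PySem.Dict.ext (pvR_insert_k j (v j) d1 d2 hR)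
        rw [this]
      · have hk' : k ∈ rest := by
          rcases List.mem_cons.mp hk with h | h
          · exact absurd h.symm hjk
          · exact h
        exact ih _ _ (pvR_insert k j (v j) d1 d2 hR) hk'

theorem pvR_start (k : Int) (x y : List Int) :
    ((PySem.Dict.empty : PySem.Dict Int (List Int)).insert k x).items.map (pvOw k [])
      = ((PySem.Dict.empty : PySem.Dict Int (List Int)).insert k y).items.map (pvOw k []) := by
  rw [PySem.Dict.items_insert, PySem.Dict.items_insert]
  simp [PySem.Dict.contains_empty, pvOw]

-- head-cell difference invisible outside the id's window
theorem pvWinEq (max_len i h : Int) (t : List Int) (c1 c2 : Prop) [Decidable c1] [Decidable c2]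
    (hok : ¬ (i < max_len ∧ |i - h| < 4)) :
    (if i < max_len then ((if c1 then [h] else []) ++ t).filter (fun j => decide (|i - j| < 4)) else ([] : List Int))
      = (if i < max_len then ((if c2 then [h] else []) ++ t).filter (fun j => decide (|i - j| < 4)) else []) := by
  by_cases him : i < max_len
  · have hw : ¬ |i - h| < 4 := fun hw => hok ⟨him, hw⟩
    simp only [if_pos him, List.filter_append]
    congr 1
    split_ifs <;> simp [hw]
  · simp [him]

theorem pvCspec_eq_cand_of_ne (max_len p h : Int) (ids rest : List Int) (hne : h ≠ p) :
    pvCspec max_len ids p (h :: rest) = pvCand max_len ids (h :: rest) := by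
  simp only [pvCspec, pvCand]
  congr 1
  refine if_congr ?_ rfl rfl
  constructor
  · rintro ⟨a, b, _⟩; exact ⟨a, b⟩
  · rintro ⟨a, b⟩; exact ⟨a, b, hne⟩

theorem pvCspec_eq_cand_of_notbase (max_len p h : Int) (ids rest : List Int)
    (hnb : ¬ (h < max_len ∧ h ∉ ids)) :
    pvCspec max_len ids p (h :: rest) = pvCand max_len ids (h :: rest) := by
  simp only [pvCspec, pvCand]
  congr 1
  have h1 : ¬ (h < max_len ∧ h ∉ ids ∧ h ≠ p) := fun ⟨a, b, _⟩ => hnb ⟨a, b⟩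
  rw [if_neg h1, if_neg hnb]

theorem pvVal_eq_of_ne (max_len p i h : Int) (ids rest : List Int) (hne : h ≠ p) :
    pvValA max_len ids (h :: rest) p i = pvValB max_len ids (h :: rest) i := by
  unfold pvValA pvValB
  rw [pvCspec_eq_cand_of_ne max_len p h ids rest hne]

theorem pvVal_eq_of_notbase (max_len p i h : Int) (ids rest : List Int)
    (hnb : ¬ (h < max_len ∧ h ∉ ids)) :
    pvValA max_len ids (h :: rest) p i = pvValB max_len ids (h :: rest) i := by
  unfold pvValA pvValB
  rw [pvCspec_eq_cand_of_notbase max_len p h ids rest hnb]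

theorem pvVal_eq_of_nok (max_len p i h : Int) (ids rest : List Int)
    (hok : ¬ (i < max_len ∧ |i - h| < 4)) :
    pvValA max_len ids (h :: rest) p i = pvValB max_len ids (h :: rest) i := by
  unfold pvValA pvValB pvCspec pvCand
  exact pvWinEq max_len i h (pvCspec max_len ids h rest) _ _ hok

theorem pvValB_def (max_len i : Int) (ids qs : List Int) :
    (if i < max_len then (pvCand max_len ids qs).filter (fun j => decide (|i - j| < 4)) else ([] : List Int))
      = pvValB max_len ids qs i := rfl

theorem pvNilFold (max_len : Int) (ids : List Int) :
    ∀ (l : List Int) (st : Int × PySem.Dict Int (List Int)),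
      (l.foldl (fun (st : Int × PySem.Dict Int (List Int)) i =>
         ((List.foldl (pvInnerA max_len i ids) (st.1, ([] : List Int)) ([] : List Int)).1,
          st.2.insert i (List.foldl (pvInnerA max_len i ids) (st.1, ([] : List Int)) ([] : List Int)).2)) st).2
      = l.foldl (fun (d : PySem.Dict Int (List Int)) i => d.insert i ([] : List Int)) st.2 := by
  intro l
  induction l with
  | nil => intro st; rfl
  | cons a t ih => intro st; exact ih _

theorem pvPeel (max_len : Int) (ids qs : List Int) (i0 : Int) (restI : List Int) :
    ((i0 :: restI).foldl
        (fun (st : Int × PySem.Dict Int (List Int)) i =>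
          ((qs.foldl (pvInnerA max_len i ids) (st.1, ([] : List Int))).1,
           st.2.insert i (qs.foldl (pvInnerA max_len i ids) (st.1, ([] : List Int))).2))
        ((-1 : Int), (PySem.Dict.empty : PySem.Dict Int (List Int)))).2
      = restI.foldl (fun d i => d.insert i (pvValA max_len ids qs (qs.getLastD (-1)) i))
          (PySem.Dict.empty.insert i0 (pvValA max_len ids qs (-1) i0)) := by
  rw [List.foldl_cons]
  have h1 : (qs.foldl (pvInnerA max_len i0 ids)
      ((((-1 : Int), (PySem.Dict.empty : PySem.Dict Int (List Int)))).1, ([] : List Int)))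
      = (qs.getLastD (-1), pvValA max_len ids qs (-1) i0) :=
    pvFoldA_eq max_len i0 ids qs _ []
  rw [h1]
  exact pvOuterA max_len ids qs restI _

theorem pvFoldIns_congr (l : List Int) (vA vB : Int → List Int)
    (d : PySem.Dict Int (List Int)) (h : ∀ i ∈ l, vA i = vB i) :
    l.foldl (fun d i => d.insert i (vA i)) d = l.foldl (fun d i => d.insert i (vB i)) d :=
  PySem.List.foldl_congr_mem l _ _ d (fun _ x hx => by rw [h x hx])

-- ===== VERDICT (by name: the statements are the Claim_ definitions above) =====
theorem Q_set_spec : Claim_unchanged_Q_set := by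
  unfold Claim_unchanged_Q_set
  intro max_len ids qs htop _
  unfold Spec_Q_set
  intro hnD
  simp only [Q_set, Q_set_alt]
  rw [pvCand_eq]
  cases ids with
  | nil => simp
  | cons i0 restI =>
      cases qs with
      | nil =>
          rw [pvNilFold]
          refine congrArg PySem.Dict.items ?_
          exact PySem.List.foldl_congr_mem _ _ _ _
            (fun acc x _ => congrArg (acc.insert x) (by simp [pvCand]))
      | cons h rest =>
          rw [pvPeel max_len (i0 :: restI) (h :: rest) i0 restI, List.foldl_cons]
          simp only [pvValB_def, List.getLastD_cons]
          -- derive the pointwise facts from the negated change region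
          simp only [D_Q_set, List.headI, List.tail_cons, List.getLastD_cons, ne_eq,
            reduceCtorEq, not_false_eq_true, true_and] at hnD
          push_neg at hnD
          by_cases hbase : h < max_len ∧ h ∉ (i0 :: restI)
          · have hnD' := hnD hbase.1 hbase.2
            by_cases hm1 : h = -1
            · -- head cell is the initial sentinel: the first round may drop it
              have h2 := hnD'.2
              by_cases hlast : h = rest.getLastD h
              · have hT : ∀ i ∈ restI, ¬ (i < max_len ∧ |i - h| < 4) := by
                  intro i hi hok
                  exact (not_lt.mpr (hnD'.1 hlast i hi hok.1)) hok.2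
                have hRest : ∀ i ∈ restI,
                    pvValA max_len (i0 :: restI) (h :: rest) (rest.getLastD h) i
                      = pvValB max_len (i0 :: restI) (h :: rest) i :=
                  fun i hi => pvVal_eq_of_nok _ _ _ _ _ _ (hT i hi)
                by_cases hi0mem : i0 ∈ restI
                · rw [pvFoldIns_congr restI _ _ _ hRest]
                  exact pvOVR _ i0 restI _ _ (pvR_start i0 _ _) hi0mem
                · have hok0 : ¬ (i0 < max_len ∧ |i0 - h| < 4) := by
                    intro hok
                    exact (not_lt.mpr (h2 hm1 hi0mem hok.1)) hok.2
                  rw [pvVal_eq_of_nok max_len (-1) i0 h (i0 :: restI) rest hok0,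
                    pvFoldIns_congr restI _ _ _ hRest]
              · have hRest : ∀ i ∈ restI,
                    pvValA max_len (i0 :: restI) (h :: rest) (rest.getLastD h) i
                      = pvValB max_len (i0 :: restI) (h :: rest) i :=
                  fun i _ => pvVal_eq_of_ne _ _ _ _ _ _ hlast
                by_cases hi0mem : i0 ∈ restI
                · rw [pvFoldIns_congr restI _ _ _ hRest]
                  exact pvOVR _ i0 restI _ _ (pvR_start i0 _ _) hi0mem
                · have hok0 : ¬ (i0 < max_len ∧ |i0 - h| < 4) := by
                    intro hok
                    exact (not_lt.mpr (h2 hm1 hi0mem hok.1)) hok.2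
                  rw [pvVal_eq_of_nok max_len (-1) i0 h (i0 :: restI) rest hok0,
                    pvFoldIns_congr restI _ _ _ hRest]
            · -- head cell differs from the initial sentinel: the first round keeps it
              rw [pvVal_eq_of_ne max_len (-1) i0 h (i0 :: restI) rest (fun he => hm1 he)]
              by_cases hlast : h = rest.getLastD h
              · have hT : ∀ i ∈ restI, ¬ (i < max_len ∧ |i - h| < 4) := by
                  intro i hi hok
                  exact (not_lt.mpr (hnD'.1 hlast i hi hok.1)) hok.2
                rw [pvFoldIns_congr restI _ _ _
                  (fun i hi => pvVal_eq_of_nok _ _ _ _ _ _ (hT i hi))]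
              · rw [pvFoldIns_congr restI _ _ _
                  (fun i _ => pvVal_eq_of_ne _ _ _ _ _ _ hlast)]
          · -- head cell fails the value/id filters in both programs
            rw [pvVal_eq_of_notbase max_len (-1) i0 h (i0 :: restI) rest hbase,
              pvFoldIns_congr restI _ _ _
                (fun i _ => pvVal_eq_of_notbase _ _ _ _ _ _ hbase)]

theorem pvGet_foldl (v : Int → List Int) :
    ∀ (l : List Int) (d : PySem.Dict Int (List Int)) (k : Int),
      (l.foldl (fun d i => d.insert i (v i)) d).get? k
        = if k ∈ l then some (v k) else d.get? k := by
  intro l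
  induction l with
  | nil => intro d k; simp
  | cons j t ih =>
      intro d k
      simp only [List.foldl_cons, ih, List.mem_cons]
      by_cases hkt : k ∈ t
      · simp [hkt]
      · by_cases hkj : k = j
        · subst hkj; simp [hkt, PySem.Dict.get?_insert_self]
        · simp [hkt, hkj, PySem.Dict.get?_insert]

theorem pvValA_drop (max_len h i : Int) (ids rest : List Int) :
    pvValA max_len ids (h :: rest) h i
      = if i < max_len then (pvCspec max_len ids h rest).filter (fun j => decide (|i - j| < 4)) else [] := by
  simp [pvValA, pvCspec]

theorem pvValB_keep (max_len h i : Int) (ids rest : List Int)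
    (hb : h < max_len ∧ h ∉ ids) (hi : i < max_len) (hw : |i - h| < 4) :
    pvValB max_len ids (h :: rest) i
      = h :: (pvCspec max_len ids h rest).filter (fun j => decide (|i - j| < 4)) := by
  simp only [pvValB, pvCand, if_pos hi, if_pos hb]
  simp [hw]

theorem Q_set_tight : Claim_exact_Q_set := by
  unfold Claim_exact_Q_set
  intro max_len ids qs htop _ hD heq
  obtain ⟨hne, hlt, hnotin, hdisj⟩ := hD
  cases qs with
  | nil => exact hne rfl
  | cons h rest =>
      simp only [List.headI] at hlt hnotin hdisj
      cases ids with
      | nil =>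
          rcases hdisj with ⟨_, i, hi, _⟩ | ⟨_, hids, _⟩
          · simp at hi
          · exact hids rfl
      | cons i0 restI =>
          simp only [Q_set, Q_set_alt] at heq
          rw [pvCand_eq, pvPeel max_len (i0 :: restI) (h :: rest) i0 restI,
            List.foldl_cons] at heq
          simp only [pvValB_def, List.getLastD_cons] at heq
          have hd := PySem.Dict.ext heq
          have hb : h < max_len ∧ h ∉ (i0 :: restI) := ⟨hlt, hnotin⟩
          rcases hdisj with ⟨hHL, i, hi, hiok⟩ | ⟨hm1, _, hi0nt, hi0lt, hi0w⟩
          · -- sentinel case across rounds: some later id keeps/drops the head cell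
            simp only [List.tail_cons] at hi
            simp only [List.getLastD_cons] at hHL
            have hg := congrArg (fun d => PySem.Dict.get? d i) hd
            simp only [pvGet_foldl, if_pos hi] at hg
            rw [← hHL, pvValA_drop, if_pos hiok.1,
              pvValB_keep max_len h i (i0 :: restI) rest hb hiok.1 hiok.2] at hg
            have := Option.some_inj.mp hg
            exact (List.cons_ne_self h _) this.symm
          · -- initial-sentinel case: the first (non-repeated) id keeps/drops the head cell
            simp only [List.headI, List.tail_cons] at hm1 hi0nt hi0lt hi0w
            have hg := congrArg (fun d => PySem.Dict.get? d i0) hd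
            simp only [pvGet_foldl, if_neg hi0nt, PySem.Dict.get?_insert_self] at hg
            rw [show (-1 : Int) = h from hm1.symm, pvValA_drop, if_pos hi0lt,
              pvValB_keep max_len h i0 (i0 :: restI) rest hb hi0lt hi0w] at hg
            have := Option.some_inj.mp hg
            exact (List.cons_ne_self h _) this.symm

theorem Q_set_changed : Claim_changed_Q_set := by
  unfold Claim_changed_Q_set; decide
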